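-- pv_equiv track=rewrite | github.com/alokkjnu/daily_codes | repeateachchar.py | repeate_letter
-- ===== SOURCE A (Python) =====
-- def repeate_letter(inp):
--     res = ""
--     ele = ""
--
--     for i in inp:
--
--         if i.isnumeric():
--             ele = str(ele)*int(i)
--             res = res+ele
--             ele = ""
--
--         else:
--             ele = i
--     return res
-- ===== SOURCE B (Python) =====
-- def repeate_letter(inp):
--     # Grammar-style pair consumption: scan with an index, matching a
--     # (non-digit, digit) pair and jumping by 2, instead of A's per-char
--     # state machine with a carried/reset buffer.
--     out = []
--     k = 0
--     n = len(inp)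
--     while k < n:
--         if k + 1 < n and not inp[k].isnumeric() and inp[k + 1].isnumeric():
--             out.append(inp[k] * int(inp[k + 1]))
--             k += 2
--         else:
--             k += 1
--     return "".join(out)
-- ===== Notes on version B (the rewrite author's own statement) =====
-- stated objective: alternative
-- what changed: Replaces A's per-character state machine (carry the last letter in a buffer, reset it after each digit) with an index-jumping pair matcher: a while loop that matches a (non-digit, digit) pair, emits the repetition and advances by 2, otherwise advances by 1, joining the pieces at the end.
import Mathlib
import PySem

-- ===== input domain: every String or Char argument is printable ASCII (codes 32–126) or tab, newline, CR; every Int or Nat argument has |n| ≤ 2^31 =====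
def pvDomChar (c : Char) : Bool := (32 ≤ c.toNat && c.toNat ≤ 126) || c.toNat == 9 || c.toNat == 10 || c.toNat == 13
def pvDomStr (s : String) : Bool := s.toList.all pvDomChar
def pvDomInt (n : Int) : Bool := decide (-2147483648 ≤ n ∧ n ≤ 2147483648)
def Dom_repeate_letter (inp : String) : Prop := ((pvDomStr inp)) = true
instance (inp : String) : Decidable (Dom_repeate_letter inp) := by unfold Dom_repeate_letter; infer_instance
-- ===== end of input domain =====

-- B replaces A's buffered state machine by an index-jumping (non-digit, digit) pair matcher; same cost.

-- ===== PORT A =====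
-- i.isnumeric() is ported as PySem.Chars.isdigit (exact on the ASCII domain);
-- int(i) as (PySem.Int.ofChars? [i]).getD 0 (the getD is unreachable: i is a digit).
def repeate_letter (inp : String) : String :=
  let st := inp.toList.foldl
    (fun (st : List Char × List Char) i =>
      if PySem.Chars.isdigit i then
        let ele := PySem.List.pyRepeat st.2 ((PySem.Int.ofChars? [i]).getD 0)
        (st.1 ++ ele, ([] : List Char))
      else (st.1, [i]))
    ([], [])
  String.ofList st.1

-- ===== PORT B =====
-- Source B's while loop: index k, stride 2 on a (non-digit, digit) match, else stride 1,
-- pieces collected in `out` and joined at the end; same conventions as port A.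
def pvBLoop (l : List Char) (k : Nat) (out : List (List Char)) : List (List Char) :=
  if h : k < l.length then
    if h2 : k + 1 < l.length then
      if !PySem.Chars.isdigit l[k] && PySem.Chars.isdigit l[k+1] then
        pvBLoop l (k+2) (out ++ [PySem.List.pyRepeat [l[k]] ((PySem.Int.ofChars? [l[k+1]]).getD 0)])
      else pvBLoop l (k+1) out
    else pvBLoop l (k+1) out
  else out
termination_by l.length - k

def repeate_letter_alt (inp : String) : String :=
  let l := inp.toList
  String.ofList (PySem.Chars.join [] (pvBLoop l 0 []))

-- ===== PRECONDITION & SPEC =====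
def Spec_repeate_letter (inp : String) (out : String) : Prop := out = repeate_letter_alt inp
instance (inp : String) (out : String) : Decidable (Spec_repeate_letter inp out) := by unfold Spec_repeate_letter; infer_instance

-- ===== CLAIM =====
def Claim_equal_repeate_letter : Prop := ∀ (inp : String), Dom_repeate_letter inp → Spec_repeate_letter inp (repeate_letter inp)

-- ===== LEMMAS AND PROOFS =====

def pvIntOf (c : Char) : Int := (PySem.Int.ofChars? [c]).getD 0

-- A's loop, abstracted: output of the rest of the loop given the current ele buffer.
def pvGA : List Char → List Char → List Char
  | _, [] => []
  | ele, c :: t =>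
      if PySem.Chars.isdigit c then PySem.List.pyRepeat ele (pvIntOf c) ++ pvGA [] t
      else pvGA [c] t

-- B's loop, abstracted: the pieces produced from the remaining suffix.
def pvGC : List Char → List (List Char)
  | c :: d :: t =>
      if !PySem.Chars.isdigit c && PySem.Chars.isdigit d then
        PySem.List.pyRepeat [c] (pvIntOf d) :: pvGC t
      else pvGC (d :: t)
  | _ => []

theorem pvFoldA (t : List Char) : ∀ (res ele : List Char),
    (t.foldl
      (fun (st : List Char × List Char) i =>
        if PySem.Chars.isdigit i then
          let e := PySem.List.pyRepeat st.2 ((PySem.Int.ofChars? [i]).getD 0)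
          (st.1 ++ e, ([] : List Char))
        else (st.1, [i])) (res, ele)).1 = res ++ pvGA ele t := by
  induction t with
  | nil => intro res ele; simp [pvGA]
  | cons c t ih =>
      intro res ele
      by_cases h : PySem.Chars.isdigit c
      · simp [pvGA, h, ih, pvIntOf, List.append_assoc]
      · simp [pvGA, h, ih]

theorem pvPyRepeat_nil (n : Int) : PySem.List.pyRepeat ([] : List Char) n = [] := by
  simp [PySem.List.pyRepeat]

theorem pvJoin_flatten (parts : List (List Char)) :
    PySem.Chars.join [] parts = parts.flatten := by
  induction parts with
  | nil => simp [PySem.Chars.join_nil]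
  | cons a rest ih =>
      cases rest with
      | nil => simp [PySem.Chars.join_singleton]
      | cons b r =>
          rw [PySem.Chars.join_cons_cons]
          simp_all

theorem pvBLoop_eq (l : List Char) : ∀ (k : Nat) (out : List (List Char)),
    pvBLoop l k out = out ++ pvGC (l.drop k) := by
  intro k
  induction hn : l.length - k using Nat.strong_induction_on generalizing k with
  | _ n ih =>
    intro out
    by_cases h : k < l.length
    · have hdk : l.drop k = l[k] :: l.drop (k+1) := List.drop_eq_getElem_cons h
      by_cases h2 : k + 1 < l.length
      · have hdk1 : l.drop (k+1) = l[k+1] :: l.drop (k+2) := List.drop_eq_getElem_cons h2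
        by_cases hc : (!PySem.Chars.isdigit l[k] && PySem.Chars.isdigit l[k+1]) = true
        · rw [pvBLoop]
          simp only [h, h2, hc, dif_pos, if_pos]
          rw [ih (l.length - (k+2)) (by omega) (k+2) rfl]
          rw [hdk, hdk1]
          simp [pvGC, hc, pvIntOf]
        · rw [pvBLoop]
          simp only [h, h2, hc, dif_pos, if_neg, Bool.not_eq_true]
          rw [ih (l.length - (k+1)) (by omega) (k+1) rfl]
          rw [hdk, hdk1]
          simp only [pvGC, hc, if_neg, Bool.not_eq_true]
      · rw [pvBLoop]
        simp only [h, h2, dif_pos]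
        rw [ih (l.length - (k+1)) (by omega) (k+1) rfl]
        have hnil : l.drop (k+1) = [] := List.drop_eq_nil_of_le (by omega)
        rw [hdk, hnil]
        simp [pvGC]
    · rw [pvBLoop]
      simp only [h]
      have : l.drop k = [] := List.drop_eq_nil_of_le (by omega)
      rw [this]
      simp [pvGC]

-- joint invariant: A's buffered recursion equals the flattening of B's pair recursion,
-- both from an empty buffer and from a buffer holding one non-digit char.
theorem pvGA_eq_flatten (s : List Char) :
    pvGA [] s = (pvGC s).flatten ∧
    ∀ c, ¬ PySem.Chars.isdigit c → pvGA [c] s = (pvGC (c :: s)).flatten := by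
  induction s with
  | nil =>
      refine ⟨by simp [pvGA, pvGC], ?_⟩
      intro c _; simp [pvGA, pvGC]
  | cons d t ih =>
      obtain ⟨ihP, ihQ⟩ := ih
      by_cases hd : PySem.Chars.isdigit d
      · have hskip : pvGC (d :: t) = pvGC t := by
          cases t with
          | nil => simp [pvGC]
          | cons e r => simp [pvGC, hd]
        constructor
        · -- digit head with empty buffer: emits nothing
          simp [pvGA, hd, pvPyRepeat_nil, hskip, ihP]
        · -- digit head after a non-digit char: one piece is emitted
          intro c hc
          simp [pvGA, pvGC, hd, hc, ihP]
      · constructor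
        · simp [pvGA, hd, ihQ d hd]
        · intro c hc
          have hskip : pvGC (c :: d :: t) = pvGC (d :: t) := by
            simp [pvGC, hd]
          rw [hskip, ← ihQ d hd]
          simp [pvGA, hd]

-- ===== VERDICT =====
theorem repeate_letter_spec : Claim_equal_repeate_letter := by
  intro inp _
  unfold Spec_repeate_letter repeate_letter repeate_letter_alt
  simp only []
  rw [pvFoldA inp.toList [] [], pvBLoop_eq inp.toList 0 [], pvJoin_flatten]
  simp only [List.drop_zero, List.nil_append]
  exact congrArg String.ofList (pvGA_eq_flatten inp.toList).1
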